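-- pv_equiv track=rewrite | github.com/diegohmacias/rosbag_to_csv | rosbag_to_csv/plot_gui.py | _find_vehicle_speed_column
-- ===== SOURCE A (Python) =====
-- def _find_vehicle_speed_column(header):
--     # Kept for backward compatibility (not used in new selection flow)
--     lower = [h.lower() for h in header]
--     for i, h in enumerate(lower):
--         if ':vehicle_speed' in h:
--             return header[i]
--     for i, h in enumerate(lower):
--         if 'speed' in h and 'steer' not in h and 'angular' not in h and 'wheel' not in h:
--             return header[i]
--     return None
-- ===== SOURCE B (Python) =====
-- def _find_vehicle_speed_column(header):
--     # Single pass carrying a fallback candidate instead of two full scans.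
--     fallback = None
--     for h in header:
--         hl = h.lower()
--         if ':vehicle_speed' in hl:
--             return h
--         if fallback is None and 'speed' in hl and 'steer' not in hl and 'angular' not in hl and 'wheel' not in hl:
--             fallback = h
--     return fallback
-- ===== Notes on version B (the rewrite author's own statement) =====
-- stated objective: simpler
-- what changed: Replaced the two sequential indexed scans over a precomputed lowered copy of the list by one direct pass that returns eagerly on ':vehicle_speed' and carries the first plain-speed match as a fallback variable.
import Mathlib
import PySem

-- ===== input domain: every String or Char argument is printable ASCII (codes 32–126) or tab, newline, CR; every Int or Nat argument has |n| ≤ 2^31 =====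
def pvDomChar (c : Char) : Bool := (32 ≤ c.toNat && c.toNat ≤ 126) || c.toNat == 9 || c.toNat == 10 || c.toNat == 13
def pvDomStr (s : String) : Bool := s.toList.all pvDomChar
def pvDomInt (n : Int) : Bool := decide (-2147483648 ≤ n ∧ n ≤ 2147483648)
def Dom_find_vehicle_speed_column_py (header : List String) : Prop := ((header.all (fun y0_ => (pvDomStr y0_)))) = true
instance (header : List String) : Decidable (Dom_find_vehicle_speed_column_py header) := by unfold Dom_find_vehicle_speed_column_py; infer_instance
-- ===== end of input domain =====

-- B replaces A's two sequential indexed scans over a lowered copy by one direct pass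
-- with an eager ':vehicle_speed' return and a fallback candidate (objective: simpler).

-- ===== PORT A =====
-- first loop: 'for i, h in enumerate(lower): if ":vehicle_speed" in h: return header[i]'
def pvA_loop1 (header : List String) : List (Int × String) → Option String
  | [] => none
  | (i, h) :: rest =>
    if PySem.Str.isIn ":vehicle_speed" h then PySem.List.pyGet? header i
    else pvA_loop1 header rest

-- second loop: 'for i, h in enumerate(lower): if "speed" in h and … : return header[i]'
def pvA_loop2 (header : List String) : List (Int × String) → Option String
  | [] => none
  | (i, h) :: rest =>
    if PySem.Str.isIn "speed" h && !PySem.Str.isIn "steer" h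
        && !PySem.Str.isIn "angular" h && !PySem.Str.isIn "wheel" h then
      PySem.List.pyGet? header i
    else pvA_loop2 header rest

def find_vehicle_speed_column_py (header : List String) : Option String :=
  let lower := header.map (fun h => PySem.Str.lower h)
  match pvA_loop1 header (PySem.List.enumerate lower 0) with
  | some r => some r
  | none => pvA_loop2 header (PySem.List.enumerate lower 0)

-- ===== PORT B =====
def pvB_loop (fallback : Option String) : List String → Option String
  | [] => fallback
  | h :: rest =>
    let hl := PySem.Str.lower h
    if PySem.Str.isIn ":vehicle_speed" hl then some h
    else
      pvB_loop
        (if fallback.isNone && PySem.Str.isIn "speed" hl && !PySem.Str.isIn "steer" hl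
            && !PySem.Str.isIn "angular" hl && !PySem.Str.isIn "wheel" hl then some h
         else fallback) rest

def find_vehicle_speed_column_py_alt (header : List String) : Option String :=
  pvB_loop none header

-- ===== PRECONDITION & SPEC =====
def Spec_find_vehicle_speed_column_py (header : List String) (out : Option String) : Prop := out = find_vehicle_speed_column_py_alt header
instance (header : List String) (out : Option String) : Decidable (Spec_find_vehicle_speed_column_py header out) := by unfold Spec_find_vehicle_speed_column_py; infer_instance

-- ===== CLAIM (what is proved, stated in full; the proofs are below) =====
def Claim_equal_find_vehicle_speed_column_py : Prop := ∀ (header : List String), Dom_find_vehicle_speed_column_py header → Spec_find_vehicle_speed_column_py header (find_vehicle_speed_column_py header)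

-- ===== LEMMAS AND PROOFS =====

-- the two membership tests, applied to the lowered string (proof-side abbreviations)
def pvVs (h : String) : Bool := PySem.Str.isIn ":vehicle_speed" (PySem.Str.lower h)
def pvPl (h : String) : Bool :=
  PySem.Str.isIn "speed" (PySem.Str.lower h) && !PySem.Str.isIn "steer" (PySem.Str.lower h)
    && !PySem.Str.isIn "angular" (PySem.Str.lower h) && !PySem.Str.isIn "wheel" (PySem.Str.lower h)

theorem pvA_loop1_eq (header : List String) :
    ∀ (suf : List String) (n : Nat), header.drop n = suf →
      pvA_loop1 header (PySem.List.enumerate (suf.map (fun h => PySem.Str.lower h)) (n : Int))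
        = suf.find? pvVs := by
  intro suf
  induction suf with
  | nil => intro n _; simp [pvA_loop1, PySem.List.enumerate_nil]
  | cons h t ih =>
    intro n hdrop
    have hget : header[n]? = some h := by
      have : (header.drop n)[0]? = some h := by rw [hdrop]; rfl
      simpa using this
    have hdrop' : header.drop (n + 1) = t := by
      rw [← List.tail_drop, hdrop]; rfl
    rw [List.map_cons, PySem.List.enumerate_cons]
    simp only [pvA_loop1]
    rw [show PySem.Str.isIn ":vehicle_speed" (PySem.Str.lower h) = pvVs h from rfl]
    cases hv : pvVs h
    · rw [List.find?_cons_of_neg (by rw [hv]; simp)]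
      have := ih (n + 1) hdrop'
      push_cast at this ⊢
      simpa [hv] using this
    · rw [List.find?_cons_of_pos hv]
      simp [PySem.List.pyGet?_natCast, hget]

theorem pvA_loop2_eq (header : List String) :
    ∀ (suf : List String) (n : Nat), header.drop n = suf →
      pvA_loop2 header (PySem.List.enumerate (suf.map (fun h => PySem.Str.lower h)) (n : Int))
        = suf.find? pvPl := by
  intro suf
  induction suf with
  | nil => intro n _; simp [pvA_loop2, PySem.List.enumerate_nil]
  | cons h t ih =>
    intro n hdrop
    have hget : header[n]? = some h := by
      have : (header.drop n)[0]? = some h := by rw [hdrop]; rfl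
      simpa using this
    have hdrop' : header.drop (n + 1) = t := by
      rw [← List.tail_drop, hdrop]; rfl
    rw [List.map_cons, PySem.List.enumerate_cons]
    simp only [pvA_loop2]
    rw [show (PySem.Str.isIn "speed" (PySem.Str.lower h) && !PySem.Str.isIn "steer" (PySem.Str.lower h)
        && !PySem.Str.isIn "angular" (PySem.Str.lower h) && !PySem.Str.isIn "wheel" (PySem.Str.lower h)) = pvPl h from rfl]
    cases hp : pvPl h
    · rw [List.find?_cons_of_neg (by rw [hp]; simp)]
      have := ih (n + 1) hdrop'
      push_cast at this ⊢
      simpa [hp] using this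
    · rw [List.find?_cons_of_pos hp]
      simp [PySem.List.pyGet?_natCast, hget]

theorem pvB_loop_eq (hs : List String) :
    ∀ (f : Option String),
      pvB_loop f hs = (hs.find? pvVs).orElse (fun _ => f.orElse (fun _ => hs.find? pvPl)) := by
  induction hs with
  | nil => intro f; cases f <;> simp [pvB_loop]
  | cons h t ih =>
    intro f
    simp only [pvB_loop]
    rw [show PySem.Str.isIn ":vehicle_speed" (PySem.Str.lower h) = pvVs h from rfl]
    cases hv : pvVs h
    · rw [List.find?_cons_of_neg (by rw [hv]; simp)]
      cases f with
      | some v =>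
        simp only [Option.isNone_some, Bool.false_and, if_neg (by simp : ¬ (false = true))]
        rw [ih]
        simp
      | none =>
        simp only [Option.isNone_none, Bool.true_and]
        rw [show (PySem.Str.isIn "speed" (PySem.Str.lower h) && !PySem.Str.isIn "steer" (PySem.Str.lower h)
            && !PySem.Str.isIn "angular" (PySem.Str.lower h) && !PySem.Str.isIn "wheel" (PySem.Str.lower h)) = pvPl h from rfl]
        cases hp : pvPl h
        · rw [List.find?_cons_of_neg (by rw [hp]; simp), ih]; simp
        · rw [List.find?_cons_of_pos hp, ih]
          cases hfv : t.find? pvVs <;> simp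
    · rw [List.find?_cons_of_pos hv]
      simp

-- ===== VERDICT (by name: the statement is the Claim_ definition above) =====
theorem find_vehicle_speed_column_py_spec : Claim_equal_find_vehicle_speed_column_py := by
  intro header _
  show find_vehicle_speed_column_py header = find_vehicle_speed_column_py_alt header
  have h1 := pvA_loop1_eq header header 0 rfl
  have h2 := pvA_loop2_eq header header 0 rfl
  have hb := pvB_loop_eq header none
  simp only [Int.natCast_zero] at h1 h2
  show (match pvA_loop1 header (PySem.List.enumerate (header.map fun h => PySem.Str.lower h)) with
        | some r => some r
        | none => pvA_loop2 header (PySem.List.enumerate (header.map fun h => PySem.Str.lower h)))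
      = pvB_loop none header
  rw [h1, h2, hb]
  cases header.find? pvVs <;> simp
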